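-- pv_equiv track=rewrite | github.com/darioavo20/PA2 | MinMax.py | calculate_connected_score
-- ===== SOURCE A (Python) =====
-- def calculate_connected_score(board):
--     score = 0
--     height = len(board)
--     width = len(board[0])
--
--     # Define scoring for different lengths of connections
--     scoring = {2: 1, 3: 2, 4: 4}
--
--     # Check horizontal, vertical, and diagonal connections
--     for row in range(height):
--         for col in range(width):
--             for dx, dy in [(1, 0), (0, 1), (1, 1), (1, -1)]:  # directions: horizontal, vertical, diagonal
--                 count = 0
--                 for d in range(1, 4):  # check up to 3 steps in each direction
--                     x, y = col + d * dx, row + d * dy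
--                     if 0 <= x < width and 0 <= y < height and board[row][col] == board[y][x] and board[row][col] != 'O':
--                         count += 1
--                     else:
--                         break
--                 score += scoring.get(count, 0)
--
--     return score
-- ===== SOURCE B (Python) =====
-- def calculate_connected_score(board):
--     width = len(board[0])
--     grid = [row[:width] for row in board]
--     height = len(grid)
--
--     def frun(xs):
--         # dp[i] = length of the run of cells equal to xs[i] extending to the right
--         n = len(xs)
--         dp = [0] * n
--         for i in range(n - 2, -1, -1):
--             if xs[i] == xs[i + 1]:
--                 dp[i] = dp[i + 1] + 1
--         return dp
--
--     def coltab(rows, shift):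
--         # dp[r][c] = dp[r+1][c+shift] + 1 if rows[r][c] == rows[r+1][c+shift] else 0
--         out = [[0] * width for _ in rows]
--         for r in range(len(rows) - 2, -1, -1):
--             cur, nxt, dn = rows[r], rows[r + 1], out[r + 1]
--             out[r] = [dn[c + shift] + 1 if cur[c] == nxt[c + shift] else 0
--                       for c in range(width - shift)] + [0] * shift
--         return out
--
--     h = [frun(row) for row in grid]
--     v = coltab(grid, 0)
--     d = coltab(grid, 1)
--     a = coltab(grid[::-1], 1)[::-1]
--
--     score = 0
--     for r in range(height):
--         row = grid[r]
--         for c in range(width):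
--             if row[c] != 'O':
--                 for t in (h, v, d, a):
--                     m = t[r][c]
--                     score += 2 if m >= 3 else 1 if m == 2 else 0
--     return score
-- ===== Notes on version B (the rewrite author's own statement) =====
-- stated objective: faster
-- what changed: Replaces the per-cell per-direction capped step-probing loop with scoring-dict lookups by four dynamic-programming run-length tables (one per direction, each built in a single pass) and a closed-form score per entry.
import Mathlib
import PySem

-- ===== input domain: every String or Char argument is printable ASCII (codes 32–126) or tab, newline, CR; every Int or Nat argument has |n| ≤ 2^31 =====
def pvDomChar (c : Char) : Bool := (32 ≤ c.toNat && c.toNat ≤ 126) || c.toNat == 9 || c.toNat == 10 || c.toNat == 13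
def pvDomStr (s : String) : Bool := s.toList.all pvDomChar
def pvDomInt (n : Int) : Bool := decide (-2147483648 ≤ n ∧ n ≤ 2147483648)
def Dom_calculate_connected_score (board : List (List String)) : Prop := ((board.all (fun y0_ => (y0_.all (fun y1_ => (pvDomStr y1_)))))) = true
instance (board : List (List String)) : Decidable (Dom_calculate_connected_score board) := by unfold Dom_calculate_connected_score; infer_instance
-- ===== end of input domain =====

-- B replaces A's per-cell 3-step probing with per-direction DP run-length tables and a
-- closed-form score per entry (measured constant-factor speedup in Python).

-- ===== PORT A =====
-- the dict literal 'scoring = {2: 1, 3: 2, 4: 4}'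
def pvScoring : PySem.Dict Int Int := PySem.Dict.ofList [(2, 1), (3, 2), (4, 4)]

-- the inner 'for d in range(1, 4): … else: break' loop; count is the accumulator
def pvAInner (board : List (List String)) (width height : Int) (cell : String)
    (col row dx dy : Int) : List Int → Int → Int
  | [], count => count
  | d :: ds, count =>
      let x := col + d * dx
      let y := row + d * dy
      if 0 ≤ x ∧ x < width ∧ 0 ≤ y ∧ y < height ∧
         cell = PySem.List.pyGetD (PySem.List.pyGetD board y []) x "" ∧ cell ≠ "O"
      then pvAInner board width height cell col row dx dy ds (count + 1)
      else count

def calculate_connected_score (board : List (List String)) : Int :=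
  let height : Int := board.length
  let width : Int := (PySem.List.pyGetD board 0 []).length
  (PySem.List.pyRange 0 height 1).foldl (fun score row =>
    (PySem.List.pyRange 0 width 1).foldl (fun score col =>
      ([((1:Int), (0:Int)), (0, 1), (1, 1), (1, -1)]).foldl (fun score dir =>
        let cell := PySem.List.pyGetD (PySem.List.pyGetD board row []) col ""
        let count := pvAInner board width height cell col row dir.1 dir.2 [1, 2, 3] 0
        score + PySem.Dict.getD pvScoring count 0) score) score) 0

-- ===== PORT B =====
-- frun: dp[i] = length of the run of cells equal to xs[i] extending to the right
-- (the backwards 'for i in range(n-2, -1, -1)' fill becomes the obvious back-to-front recursion)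
def pvFrun : List String → List Int
  | [] => []
  | [_] => [0]
  | a :: b :: rest =>
      (if a = b then (pvFrun (b :: rest)).headD 0 + 1 else 0) :: pvFrun (b :: rest)

-- one filled row of coltab: the comprehension over range(width - shift) plus the [0]*shift tail
def pvRowStep (width shift : Nat) (cur nxt : List String) (dn : List Int) : List Int :=
  (List.range (width - shift)).map (fun c =>
    if cur.getD c "" = nxt.getD (c + shift) "" then dn.getD (c + shift) 0 + 1 else 0)
  ++ List.replicate shift 0

-- coltab: dp[r][c] = dp[r+1][c+shift] + 1 if rows[r][c] == rows[r+1][c+shift] else 0,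
-- filled bottom-up (last row stays [0]*width)
def pvColtab (width shift : Nat) : List (List String) → List (List Int)
  | [] => []
  | [_] => [List.replicate width 0]
  | cur :: nxt :: rest =>
      let out := pvColtab width shift (nxt :: rest)
      pvRowStep width shift cur nxt (out.headD []) :: out

def calculate_connected_score_alt (board : List (List String)) : Int :=
  let width : Nat := (board.headD []).length
  let grid := board.map (fun row => row.take width)
  let h := grid.map pvFrun
  let v := pvColtab width 0 grid
  let dg := pvColtab width 1 grid
  let ag := (pvColtab width 1 grid.reverse).reverse
  (List.range grid.length).foldl (fun score r =>
    let row := grid.getD r []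
    (List.range width).foldl (fun score c =>
      if row.getD c "" ≠ "O" then
        [h, v, dg, ag].foldl (fun score t =>
          let m := (t.getD r []).getD c 0
          score + (if m ≥ 3 then 2 else if m = 2 then 1 else 0)) score
      else score) score) 0

-- ===== PRECONDITION & SPEC =====
-- Pre_ excludes exactly the inputs where Python A raises IndexError: the empty board
-- (board[0]) and boards with a row shorter than the first row (board[y][x] with x < width).
def Pre_calculate_connected_score (board : List (List String)) : Prop :=
  board ≠ [] ∧ ∀ row ∈ board, (board.headD []).length ≤ row.length

instance (board : List (List String)) : Decidable (Pre_calculate_connected_score board) := by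
  unfold Pre_calculate_connected_score; infer_instance

def pvWitness_calculate_connected_score : List (List String) := [["X", "X"], ["X", "O"]]

def Spec_calculate_connected_score (board : List (List String)) (out : Int) : Prop := out = calculate_connected_score_alt board
instance (board : List (List String)) (out : Int) : Decidable (Spec_calculate_connected_score board out) := by unfold Spec_calculate_connected_score; infer_instance

-- ===== CLAIM (what is proved, stated in full; the proofs are below) =====
def Claim_equal_calculate_connected_score : Prop := ∀ (board : List (List String)), Dom_calculate_connected_score board → Pre_calculate_connected_score board → Spec_calculate_connected_score board (calculate_connected_score board)


-- ===== LEMMAS AND PROOFS =====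

-- closed-form score of a run-length entry (B's '2 if m >= 3 else 1 if m == 2 else 0')
def pvF (m : Int) : Int := if m ≥ 3 then 2 else if m = 2 then 1 else 0

-- cell (r, c) of a grid / of an Int table (0-defaulted)
def pvG (g : List (List String)) (r c : Nat) : String := (g.getD r []).getD c ""
def pvT (t : List (List Int)) (r c : Nat) : Int := (t.getD r []).getD c 0

-- the step-d condition of A's inner loop (abbrev so `if` finds decidability)
abbrev pvC (board : List (List String)) (width height : Int) (cell : String)
    (col row dx dy d : Int) : Prop :=
  0 ≤ col + d * dx ∧ col + d * dx < width ∧ 0 ≤ row + d * dy ∧ row + d * dy < height ∧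
  cell = PySem.List.pyGetD (PySem.List.pyGetD board (row + d * dy) []) (col + d * dx) "" ∧
  cell ≠ "O"

lemma pvHeadD {α : Type} (l : List α) (d : α) : l.headD d = l.getD 0 d := by
  cases l <;> simp

lemma pvTakeGetD {α : Type} (l : List α) (c W : Nat) (h : c < W) (d : α) :
    (l.take W).getD c d = l.getD c d := by
  by_cases hc : c < l.length
  · rw [List.getD_eq_getElem _ _ (by simp; omega), List.getD_eq_getElem _ _ hc, List.getElem_take]
  · rw [List.getD_eq_default _ _ (by simp; omega), List.getD_eq_default _ _ (by omega)]

lemma pvRevGetD {α : Type} (l : List α) (i : Nat) (h : i < l.length) (d : α) :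
    l.reverse.getD i d = l.getD (l.length - 1 - i) d := by
  have h' : i < l.reverse.length := by simpa using h
  rw [List.getD_eq_getElem _ _ h', List.getD_eq_getElem _ _ (by omega), List.getElem_reverse]

lemma pvMapGetD {α β : Type} (f : α → β) (l : List α) (r : Nat) (da : α) (db : β)
    (hf : f da = db) : (l.map f).getD r db = f (l.getD r da) := by
  by_cases h : r < l.length
  · rw [List.getD_eq_getElem _ _ (by simpa using h), List.getD_eq_getElem _ _ h, List.getElem_map]
  · rw [List.getD_eq_default _ _ (by simp; omega), List.getD_eq_default _ _ (by omega), hf]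

lemma pvGetDNonneg (l : List Int) (i : Nat) (h : ∀ m ∈ l, 0 ≤ m) : 0 ≤ l.getD i 0 := by
  by_cases hi : i < l.length
  · rw [List.getD_eq_getElem _ _ hi]; exact h _ (List.getElem_mem hi)
  · rw [List.getD_eq_default _ _ (by omega)]

lemma pvFrun_nonneg : ∀ (xs : List String), ∀ m ∈ pvFrun xs, 0 ≤ m := by
  intro xs
  induction xs with
  | nil => simp [pvFrun]
  | cons a t ih =>
    cases t with
    | nil => simp [pvFrun]
    | cons b rest =>
      intro m hm
      simp only [pvFrun] at hm
      rcases List.mem_cons.mp hm with h | h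
      · subst h
        split
        · have := pvGetDNonneg (pvFrun (b :: rest)) 0 ih
          rw [pvHeadD]; omega
        · omega
      · exact ih m h

lemma pvFrun_getD (xs : List String) (c : Nat) :
    (pvFrun xs).getD c 0 =
      if c + 1 < xs.length ∧ xs.getD c "" = xs.getD (c + 1) "" then
        (pvFrun xs).getD (c + 1) 0 + 1
      else 0 := by
  induction xs generalizing c with
  | nil => simp [pvFrun]
  | cons a t ih =>
    cases t with
    | nil =>
      cases c with
      | zero => simp [pvFrun]
      | succ k => simp [pvFrun]
    | cons b rest =>
      cases c with
      | zero =>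
        simp only [pvFrun, List.getD_cons_zero, List.getD_cons_succ, List.length_cons]
        rw [pvHeadD]
        by_cases hab : a = b
        · rw [if_pos hab, if_pos ⟨by omega, hab⟩]
        · rw [if_neg hab, if_neg (by simp [hab])]
      | succ k =>
        simp only [pvFrun, List.getD_cons_succ, List.length_cons]
        rw [ih k]
        apply if_congr _ rfl rfl
        simp only [List.getD_cons_succ, List.length_cons]
        constructor <;> rintro ⟨h1, h2⟩ <;> exact ⟨by omega, h2⟩

lemma pvColtab_length (W s : Nat) (rows : List (List String)) :
    (pvColtab W s rows).length = rows.length := by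
  induction rows with
  | nil => simp [pvColtab]
  | cons cur t ih =>
    cases t with
    | nil => simp [pvColtab]
    | cons nxt rest =>
      simp only [pvColtab, List.length_cons]
      simp only [List.length_cons] at ih
      omega

lemma pvColtab_nonneg (W s : Nat) :
    ∀ (rows : List (List String)), ∀ row ∈ pvColtab W s rows, ∀ m ∈ row, 0 ≤ m := by
  intro rows
  induction rows with
  | nil => simp [pvColtab]
  | cons cur t ih =>
    cases t with
    | nil =>
      intro row hrow m hm
      simp only [pvColtab, List.mem_singleton] at hrow
      subst hrow
      have := List.eq_of_mem_replicate hm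
      omega
    | cons nxt rest =>
      intro row hrow m hm
      simp only [pvColtab] at hrow
      rcases List.mem_cons.mp hrow with h | h
      · subst h
        have hdn : ∀ m ∈ ((pvColtab W s (nxt :: rest)).headD []), 0 ≤ m := by
          rw [pvHeadD]
          intro m hm
          by_cases h0 : 0 < (pvColtab W s (nxt :: rest)).length
          · rw [List.getD_eq_getElem _ _ h0] at hm
            exact ih _ (List.getElem_mem h0) m hm
          · rw [List.getD_eq_default _ _ (by omega)] at hm; simp at hm
        unfold pvRowStep at hm
        rcases List.mem_append.mp hm with h | h
        · rcases List.mem_map.mp h with ⟨i, _, hi⟩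
          rw [← hi]
          split
          · have := pvGetDNonneg _ (i + s) hdn; omega
          · omega
        · have := List.eq_of_mem_replicate h; omega
      · exact ih row h m hm

lemma pvColtab_getD (W s : Nat) (rows : List (List String)) (r c : Nat) :
    pvT (pvColtab W s rows) r c =
      if r + 1 < rows.length ∧ c + s < W ∧ pvG rows r c = pvG rows (r + 1) (c + s) then
        pvT (pvColtab W s rows) (r + 1) (c + s) + 1
      else 0 := by
  induction rows generalizing r with
  | nil => simp [pvColtab, pvT]
  | cons cur t ih =>
    cases t with
    | nil =>
      rw [if_neg (by rintro ⟨h1, _, _⟩; simp at h1)]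
      cases r with
      | zero =>
        simp only [pvColtab, pvT, List.getD_cons_zero]
        by_cases hc : c < W
        · rw [List.getD_eq_getElem _ _ (by simpa using hc)]; simp
        · rw [List.getD_eq_default _ _ (by simpa using hc)]
      | succ k => simp [pvColtab, pvT]
    | cons nxt rest =>
      have hout : pvColtab W s (cur :: nxt :: rest) =
          pvRowStep W s cur nxt ((pvColtab W s (nxt :: rest)).headD []) ::
            pvColtab W s (nxt :: rest) := rfl
      cases r with
      | zero =>
        rw [hout]
        simp only [pvT, pvG, List.getD_cons_zero, List.getD_cons_succ, pvRowStep]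
        by_cases hcs : c < W - s
        · rw [List.getD_append _ _ _ _ (by simpa using hcs)]
          rw [PySem.List.getD_map_range _ _ _ _ hcs, pvHeadD]
          by_cases heq : cur.getD c "" = nxt.getD (c + s) ""
          · rw [if_pos heq, if_pos ⟨by simp, by omega, heq⟩]
          · rw [if_neg heq, if_neg (by rintro ⟨_, _, h⟩; exact heq h)]
        · rw [List.getD_append_right _ _ _ _ (by simpa using hcs)]
          rw [if_neg (by rintro ⟨_, h2, _⟩; omega)]
          by_cases hlt : c - (List.range (W - s)).length < s
          · rw [List.getD_eq_getElem _ _ (by simpa using hlt)]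
            simp
          · rw [List.getD_eq_default _ _ (by simpa using hlt)]
      | succ k =>
        rw [hout]
        simp only [pvT, pvG, List.getD_cons_succ, List.length_cons]
        have ihk := ih k
        simp only [pvT, pvG, List.length_cons] at ihk
        rw [ihk]
        apply if_congr _ rfl rfl
        constructor <;> rintro ⟨h1, h2, h3⟩ <;> exact ⟨by omega, h2, h3⟩

lemma pvAg_getD (W : Nat) (g : List (List String)) (r c : Nat) (hr : r < g.length) :
    pvT ((pvColtab W 1 g.reverse).reverse) r c =
      if 1 ≤ r ∧ c + 1 < W ∧ pvG g r c = pvG g (r - 1) (c + 1) then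
        pvT ((pvColtab W 1 g.reverse).reverse) (r - 1) (c + 1) + 1
      else 0 := by
  have hlen : (pvColtab W 1 g.reverse).length = g.length := by
    rw [pvColtab_length]; simp
  have hT : ∀ (i : Nat) (c' : Nat), i < g.length →
      pvT ((pvColtab W 1 g.reverse).reverse) i c' =
        pvT (pvColtab W 1 g.reverse) (g.length - 1 - i) c' := by
    intro i c' hi
    unfold pvT
    rw [pvRevGetD _ _ (by omega), hlen]
  have hGrev : ∀ (i : Nat) (c' : Nat), i < g.length →
      pvG g.reverse i c' = pvG g (g.length - 1 - i) c' := by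
    intro i c' hi
    unfold pvG
    rw [pvRevGetD _ _ (by simpa using hi)]
  rw [hT r c hr, pvColtab_getD]
  by_cases h1 : 1 ≤ r
  · have hn : 2 ≤ g.length := by omega
    have e1 : pvG g.reverse (g.length - 1 - r) c = pvG g r c := by
      rw [hGrev _ _ (by omega)]
      congr 1; omega
    have e2 : pvG g.reverse (g.length - 1 - r + 1) (c + 1) = pvG g (r - 1) (c + 1) := by
      rw [hGrev _ _ (by omega)]
      congr 1; omega
    have e3 : pvT (pvColtab W 1 g.reverse) (g.length - 1 - r + 1) (c + 1) =
        pvT ((pvColtab W 1 g.reverse).reverse) (r - 1) (c + 1) := by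
      rw [hT (r - 1) (c + 1) (by omega)]
      congr 1; omega
    rw [e1, e2, e3]
    apply if_congr _ rfl rfl
    constructor
    · rintro ⟨_, h2, h3⟩; exact ⟨h1, h2, h3⟩
    · rintro ⟨_, h2, h3⟩; exact ⟨by simp; omega, h2, h3⟩
  · rw [if_neg (by rintro ⟨hl, _, _⟩; simp at hl; omega),
        if_neg (by rintro ⟨hl, _, _⟩; omega)]

lemma pvT_nonneg (t : List (List Int)) (r c : Nat)
    (h : ∀ row ∈ t, ∀ m ∈ row, 0 ≤ m) : 0 ≤ pvT t r c := by
  unfold pvT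
  apply pvGetDNonneg
  intro m hm
  by_cases hr : r < t.length
  · exact h _ (by rw [List.getD_eq_getElem _ _ hr] at hm ⊢; exact List.getElem_mem hr) m hm
  · rw [List.getD_eq_default _ _ (by omega)] at hm; simp at hm

lemma pvAInner_unfold (board : List (List String)) (w h : Int) (cell : String)
    (col row dx dy : Int) :
    pvAInner board w h cell col row dx dy [1, 2, 3] 0 =
      if pvC board w h cell col row dx dy 1 then
        (if pvC board w h cell col row dx dy 2 then
          (if pvC board w h cell col row dx dy 3 then 3 else 2)
        else 1)
      else 0 := by
  simp only [pvAInner, pvC]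
  norm_num

lemma pvCellDir (nO e1 e2 e3 q1 q2 q3 : Prop)
    [Decidable nO] [Decidable e1] [Decidable e2] [Decidable e3]
    [Decidable q1] [Decidable q2] [Decidable q3]
    (m1 m2 m3 m4 : Int)
    (hm1 : m1 = if q1 then m2 + 1 else 0)
    (hm2 : q1 → m2 = if q2 then m3 + 1 else 0)
    (hm3 : q1 → q2 → m3 = if q3 then m4 + 1 else 0)
    (hm4 : q1 → q2 → q3 → 0 ≤ m4)
    (he1 : e1 ↔ q1 ∧ nO)
    (he2 : e1 → (e2 ↔ q2 ∧ nO))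
    (he3 : e1 → e2 → (e3 ↔ q3 ∧ nO)) :
    PySem.Dict.getD pvScoring (if e1 then (if e2 then (if e3 then 3 else 2) else 1) else 0) 0
      = if nO then pvF m1 else 0 := by
  by_cases hO : nO
  · rw [if_pos hO]
    by_cases h1 : q1
    · have hE1 : e1 := he1.mpr ⟨h1, hO⟩
      rw [if_pos hE1]
      by_cases h2 : q2
      · have hE2 : e2 := (he2 hE1).mpr ⟨h2, hO⟩
        rw [if_pos hE2]
        by_cases h3 : q3
        · have hE3 : e3 := (he3 hE1 hE2).mpr ⟨h3, hO⟩
          rw [if_pos hE3]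
          have hv : m1 = m4 + 3 := by
            rw [hm1, if_pos h1, hm2 h1, if_pos h2, hm3 h1 h2, if_pos h3]; ring
          have h4 := hm4 h1 h2 h3
          have : pvF m1 = 2 := by unfold pvF; rw [if_pos (by omega)]
          rw [this]; rfl
        · rw [if_neg (fun hE3 => h3 (((he3 hE1 hE2).mp hE3).1))]
          have hv : m1 = 2 := by
            rw [hm1, if_pos h1, hm2 h1, if_pos h2, hm3 h1 h2, if_neg h3]; ring
          have : pvF m1 = 1 := by unfold pvF; rw [hv]; norm_num
          rw [this]; rfl
      · rw [if_neg (fun hE2 => h2 (((he2 hE1).mp hE2).1))]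
        have hv : m1 = 1 := by rw [hm1, if_pos h1, hm2 h1, if_neg h2]; ring
        have : pvF m1 = 0 := by unfold pvF; rw [hv]; norm_num
        rw [this]; rfl
    · rw [if_neg (fun hE1 => h1 ((he1.mp hE1).1))]
      have hv : m1 = 0 := by rw [hm1, if_neg h1]
      have : pvF m1 = 0 := by unfold pvF; rw [hv]; norm_num
      rw [this]; rfl
  · rw [if_neg hO, if_neg (fun hE1 => hO ((he1.mp hE1).2))]
    rfl


-- the truncated grid B works on
def pvGrid (board : List (List String)) : List (List String) :=
  board.map (fun row => row.take (board.headD []).length)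

lemma pvGridG (board : List (List String)) (r c : Nat)
    (hc : c < (board.headD []).length) :
    pvG (pvGrid board) r c = (board.getD r []).getD c "" := by
  unfold pvG pvGrid
  rw [pvMapGetD _ _ _ [] [] (by simp)]
  exact pvTakeGetD _ _ _ hc _

lemma pvRowLen (board : List (List String)) (hPre : Pre_calculate_connected_score board)
    (r : Nat) (hr : r < board.length) :
    ((pvGrid board).getD r []).length = (board.headD []).length := by
  unfold pvGrid
  rw [pvMapGetD _ _ _ [] [] (by simp), List.length_take]
  have hm : board.getD r [] ∈ board := by
    rw [List.getD_eq_getElem _ _ hr]; exact List.getElem_mem hr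
  have := hPre.2 _ hm
  omega

lemma pvCellVal (board : List (List String)) (i j : Nat) (y x : Int)
    (hy : y = (i : Int)) (hx : x = (j : Int)) (hj : j < (board.headD []).length) :
    PySem.List.pyGetD (PySem.List.pyGetD board y []) x "" = pvG (pvGrid board) i j := by
  subst hy hx
  rw [PySem.List.pyGetD_natCast, PySem.List.pyGetD_natCast, pvGridG board i j hj]

lemma pvDirH (board : List (List String)) (hPre : Pre_calculate_connected_score board)
    (r c : Nat) (hr : r < board.length) (_hc : c < (board.headD []).length) :
    PySem.Dict.getD pvScoring
      (pvAInner board ((board.headD []).length : Int) (board.length : Int)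
        (pvG (pvGrid board) r c) (c : Int) (r : Int) 1 0 [1, 2, 3] 0) 0
      = if pvG (pvGrid board) r c ≠ "O" then pvF (pvT ((pvGrid board).map pvFrun) r c) else 0 := by
  have hlen : ((pvGrid board).getD r []).length = (board.headD []).length :=
    pvRowLen board hPre r hr
  have hfr : ∀ c' : Nat, pvT ((pvGrid board).map pvFrun) r c' =
      (pvFrun ((pvGrid board).getD r [])).getD c' 0 := by
    intro c'; unfold pvT; rw [pvMapGetD pvFrun _ _ [] [] rfl]
  rw [pvAInner_unfold, hfr c]
  set xs := (pvGrid board).getD r [] with hxs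
  apply pvCellDir _ _ _ _
    (c + 1 < xs.length ∧ xs.getD c "" = xs.getD (c + 1) "")
    (c + 1 + 1 < xs.length ∧ xs.getD (c + 1) "" = xs.getD (c + 1 + 1) "")
    (c + 1 + 1 + 1 < xs.length ∧ xs.getD (c + 1 + 1) "" = xs.getD (c + 1 + 1 + 1) "")
    _ ((pvFrun xs).getD (c + 1) 0) ((pvFrun xs).getD (c + 1 + 1) 0)
    ((pvFrun xs).getD (c + 1 + 1 + 1) 0)
  · exact pvFrun_getD xs c
  · exact fun _ => pvFrun_getD xs (c + 1)
  · exact fun _ _ => pvFrun_getD xs (c + 1 + 1)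
  · exact fun _ _ _ => pvGetDNonneg _ _ (pvFrun_nonneg xs)
  · constructor
    · rintro ⟨-, h2, -, -, h5, h6⟩
      have hc1 : c + 1 < (board.headD []).length := by push_cast at h2; omega
      rw [pvCellVal board r (c + 1) _ _ (by push_cast; ring) (by push_cast; ring) hc1] at h5
      exact ⟨⟨by rw [hlen]; exact hc1, h5⟩, h6⟩
    · rintro ⟨⟨hq1, hq2⟩, h6⟩
      rw [hlen] at hq1
      refine ⟨by push_cast; omega, by push_cast; omega, by push_cast; omega,
        by push_cast; omega, ?_, h6⟩
      rw [pvCellVal board r (c + 1) _ _ (by push_cast; ring) (by push_cast; ring) hq1]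
      exact hq2
  · rintro ⟨-, h2e, -, -, h5e, -⟩
    have hc1 : c + 1 < (board.headD []).length := by push_cast at h2e; omega
    rw [pvCellVal board r (c + 1) _ _ (by push_cast; ring) (by push_cast; ring) hc1] at h5e
    constructor
    · rintro ⟨-, h2, -, -, h5, h6⟩
      have hc2 : c + 1 + 1 < (board.headD []).length := by push_cast at h2; omega
      rw [pvCellVal board r (c + 1 + 1) _ _ (by push_cast; ring) (by push_cast; ring) hc2] at h5
      exact ⟨⟨by rw [hlen]; exact hc2, h5e.symm.trans h5⟩, h6⟩
    · rintro ⟨⟨hq1, hq2⟩, h6⟩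
      rw [hlen] at hq1
      refine ⟨by push_cast; omega, by push_cast; omega, by push_cast; omega,
        by push_cast; omega, ?_, h6⟩
      rw [pvCellVal board r (c + 1 + 1) _ _ (by push_cast; ring) (by push_cast; ring) hq1]
      exact h5e.trans hq2
  · rintro ⟨-, h2e, -, -, h5e, -⟩ ⟨-, h2e2, -, -, h5e2, -⟩
    have hc1 : c + 1 < (board.headD []).length := by push_cast at h2e; omega
    have hc2 : c + 1 + 1 < (board.headD []).length := by push_cast at h2e2; omega
    rw [pvCellVal board r (c + 1) _ _ (by push_cast; ring) (by push_cast; ring) hc1] at h5e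
    rw [pvCellVal board r (c + 1 + 1) _ _ (by push_cast; ring) (by push_cast; ring) hc2] at h5e2
    constructor
    · rintro ⟨-, h2, -, -, h5, h6⟩
      have hc3 : c + 1 + 1 + 1 < (board.headD []).length := by push_cast at h2; omega
      rw [pvCellVal board r (c + 1 + 1 + 1) _ _ (by push_cast; ring) (by push_cast; ring) hc3] at h5
      exact ⟨⟨by rw [hlen]; exact hc3, h5e2.symm.trans h5⟩, h6⟩
    · rintro ⟨⟨hq1, hq2⟩, h6⟩
      rw [hlen] at hq1
      refine ⟨by push_cast; omega, by push_cast; omega, by push_cast; omega,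
        by push_cast; omega, ?_, h6⟩
      rw [pvCellVal board r (c + 1 + 1 + 1) _ _ (by push_cast; ring) (by push_cast; ring) hq1]
      exact h5e2.trans hq2

lemma pvGridLen (board : List (List String)) : (pvGrid board).length = board.length := by
  unfold pvGrid; simp

lemma pvDirV (board : List (List String)) (_hPre : Pre_calculate_connected_score board)
    (r c : Nat) (_hr : r < board.length) (hc : c < (board.headD []).length) :
    PySem.Dict.getD pvScoring
      (pvAInner board ((board.headD []).length : Int) (board.length : Int)
        (pvG (pvGrid board) r c) (c : Int) (r : Int) 0 1 [1, 2, 3] 0) 0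
      = if pvG (pvGrid board) r c ≠ "O" then
          pvF (pvT (pvColtab (board.headD []).length 0 (pvGrid board)) r c) else 0 := by
  have hgl : (pvGrid board).length = board.length := pvGridLen board
  rw [pvAInner_unfold]
  set W := (board.headD []).length with hW
  set g := pvGrid board with hg
  apply pvCellDir _ _ _ _
    (r + 1 < g.length ∧ c + 0 < W ∧ pvG g r c = pvG g (r + 1) (c + 0))
    (r + 1 + 1 < g.length ∧ c + 0 + 0 < W ∧ pvG g (r + 1) (c + 0) = pvG g (r + 1 + 1) (c + 0 + 0))
    (r + 1 + 1 + 1 < g.length ∧ c + 0 + 0 + 0 < W ∧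
      pvG g (r + 1 + 1) (c + 0 + 0) = pvG g (r + 1 + 1 + 1) (c + 0 + 0 + 0))
    _ (pvT (pvColtab W 0 g) (r + 1) (c + 0)) (pvT (pvColtab W 0 g) (r + 1 + 1) (c + 0 + 0))
    (pvT (pvColtab W 0 g) (r + 1 + 1 + 1) (c + 0 + 0 + 0))
  · exact pvColtab_getD W 0 g r c
  · exact fun _ => pvColtab_getD W 0 g (r + 1) (c + 0)
  · exact fun _ _ => pvColtab_getD W 0 g (r + 1 + 1) (c + 0 + 0)
  · exact fun _ _ _ => pvT_nonneg _ _ _ (pvColtab_nonneg W 0 g)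
  · constructor
    · rintro ⟨-, -, -, h4, h5, h6⟩
      have hr1 : r + 1 < board.length := by push_cast at h4; omega
      rw [pvCellVal board (r + 1) c _ _ (by push_cast; ring) (by push_cast; ring) hc] at h5
      exact ⟨⟨by omega, by omega, h5⟩, h6⟩
    · rintro ⟨⟨hq1, hq2, hq3⟩, h6⟩
      rw [hgl] at hq1
      refine ⟨by push_cast; omega, by push_cast; omega, by push_cast; omega,
        by push_cast; omega, ?_, h6⟩
      rw [pvCellVal board (r + 1) c _ _ (by push_cast; ring) (by push_cast; ring) hc]
      exact hq3
  · rintro ⟨-, -, -, h4e, h5e, -⟩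
    have hr1 : r + 1 < board.length := by push_cast at h4e; omega
    rw [pvCellVal board (r + 1) c _ _ (by push_cast; ring) (by push_cast; ring) hc] at h5e
    constructor
    · rintro ⟨-, -, -, h4, h5, h6⟩
      have hr2 : r + 1 + 1 < board.length := by push_cast at h4; omega
      rw [pvCellVal board (r + 1 + 1) c _ _ (by push_cast; ring) (by push_cast; ring) hc] at h5
      exact ⟨⟨by omega, by omega, h5e.symm.trans h5⟩, h6⟩
    · rintro ⟨⟨hq1, hq2, hq3⟩, h6⟩
      rw [hgl] at hq1
      refine ⟨by push_cast; omega, by push_cast; omega, by push_cast; omega,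
        by push_cast; omega, ?_, h6⟩
      rw [pvCellVal board (r + 1 + 1) c _ _ (by push_cast; ring) (by push_cast; ring) hc]
      exact h5e.trans hq3
  · rintro ⟨-, -, -, h4e, h5e, -⟩ ⟨-, -, -, h4e2, h5e2, -⟩
    have hr1 : r + 1 < board.length := by push_cast at h4e; omega
    have hr2 : r + 1 + 1 < board.length := by push_cast at h4e2; omega
    rw [pvCellVal board (r + 1) c _ _ (by push_cast; ring) (by push_cast; ring) hc] at h5e
    rw [pvCellVal board (r + 1 + 1) c _ _ (by push_cast; ring) (by push_cast; ring) hc] at h5e2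
    constructor
    · rintro ⟨-, -, -, h4, h5, h6⟩
      have hr3 : r + 1 + 1 + 1 < board.length := by push_cast at h4; omega
      rw [pvCellVal board (r + 1 + 1 + 1) c _ _ (by push_cast; ring) (by push_cast; ring) hc] at h5
      exact ⟨⟨by omega, by omega, h5e2.symm.trans h5⟩, h6⟩
    · rintro ⟨⟨hq1, hq2, hq3⟩, h6⟩
      rw [hgl] at hq1
      refine ⟨by push_cast; omega, by push_cast; omega, by push_cast; omega,
        by push_cast; omega, ?_, h6⟩
      rw [pvCellVal board (r + 1 + 1 + 1) c _ _ (by push_cast; ring) (by push_cast; ring) hc]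
      exact h5e2.trans hq3

lemma pvDirD (board : List (List String)) (_hPre : Pre_calculate_connected_score board)
    (r c : Nat) (_hr : r < board.length) (_hc : c < (board.headD []).length) :
    PySem.Dict.getD pvScoring
      (pvAInner board ((board.headD []).length : Int) (board.length : Int)
        (pvG (pvGrid board) r c) (c : Int) (r : Int) 1 1 [1, 2, 3] 0) 0
      = if pvG (pvGrid board) r c ≠ "O" then
          pvF (pvT (pvColtab (board.headD []).length 1 (pvGrid board)) r c) else 0 := by
  have hgl : (pvGrid board).length = board.length := pvGridLen board
  rw [pvAInner_unfold]
  set W := (board.headD []).length with hW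
  set g := pvGrid board with hg
  apply pvCellDir _ _ _ _
    (r + 1 < g.length ∧ c + 1 < W ∧ pvG g r c = pvG g (r + 1) (c + 1))
    (r + 1 + 1 < g.length ∧ c + 1 + 1 < W ∧ pvG g (r + 1) (c + 1) = pvG g (r + 1 + 1) (c + 1 + 1))
    (r + 1 + 1 + 1 < g.length ∧ c + 1 + 1 + 1 < W ∧
      pvG g (r + 1 + 1) (c + 1 + 1) = pvG g (r + 1 + 1 + 1) (c + 1 + 1 + 1))
    _ (pvT (pvColtab W 1 g) (r + 1) (c + 1)) (pvT (pvColtab W 1 g) (r + 1 + 1) (c + 1 + 1))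
    (pvT (pvColtab W 1 g) (r + 1 + 1 + 1) (c + 1 + 1 + 1))
  · exact pvColtab_getD W 1 g r c
  · exact fun _ => pvColtab_getD W 1 g (r + 1) (c + 1)
  · exact fun _ _ => pvColtab_getD W 1 g (r + 1 + 1) (c + 1 + 1)
  · exact fun _ _ _ => pvT_nonneg _ _ _ (pvColtab_nonneg W 1 g)
  · constructor
    · rintro ⟨-, h2, -, h4, h5, h6⟩
      have hr1 : r + 1 < board.length := by push_cast at h4; omega
      have hc1 : c + 1 < W := by push_cast at h2; omega
      rw [pvCellVal board (r + 1) (c + 1) _ _ (by push_cast; ring) (by push_cast; ring) hc1] at h5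
      exact ⟨⟨by omega, hc1, h5⟩, h6⟩
    · rintro ⟨⟨hq1, hq2, hq3⟩, h6⟩
      rw [hgl] at hq1
      refine ⟨by push_cast; omega, by push_cast; omega, by push_cast; omega,
        by push_cast; omega, ?_, h6⟩
      rw [pvCellVal board (r + 1) (c + 1) _ _ (by push_cast; ring) (by push_cast; ring) hq2]
      exact hq3
  · rintro ⟨-, h2e, -, h4e, h5e, -⟩
    have hr1 : r + 1 < board.length := by push_cast at h4e; omega
    have hc1 : c + 1 < W := by push_cast at h2e; omega
    rw [pvCellVal board (r + 1) (c + 1) _ _ (by push_cast; ring) (by push_cast; ring) hc1] at h5e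
    constructor
    · rintro ⟨-, h2, -, h4, h5, h6⟩
      have hr2 : r + 1 + 1 < board.length := by push_cast at h4; omega
      have hc2 : c + 1 + 1 < W := by push_cast at h2; omega
      rw [pvCellVal board (r + 1 + 1) (c + 1 + 1) _ _ (by push_cast; ring) (by push_cast; ring) hc2] at h5
      exact ⟨⟨by omega, hc2, h5e.symm.trans h5⟩, h6⟩
    · rintro ⟨⟨hq1, hq2, hq3⟩, h6⟩
      rw [hgl] at hq1
      refine ⟨by push_cast; omega, by push_cast; omega, by push_cast; omega,
        by push_cast; omega, ?_, h6⟩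
      rw [pvCellVal board (r + 1 + 1) (c + 1 + 1) _ _ (by push_cast; ring) (by push_cast; ring) hq2]
      exact h5e.trans hq3
  · rintro ⟨-, h2e, -, h4e, h5e, -⟩ ⟨-, h2e2, -, h4e2, h5e2, -⟩
    have hr1 : r + 1 < board.length := by push_cast at h4e; omega
    have hc1 : c + 1 < W := by push_cast at h2e; omega
    have hr2 : r + 1 + 1 < board.length := by push_cast at h4e2; omega
    have hc2 : c + 1 + 1 < W := by push_cast at h2e2; omega
    rw [pvCellVal board (r + 1) (c + 1) _ _ (by push_cast; ring) (by push_cast; ring) hc1] at h5e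
    rw [pvCellVal board (r + 1 + 1) (c + 1 + 1) _ _ (by push_cast; ring) (by push_cast; ring) hc2] at h5e2
    constructor
    · rintro ⟨-, h2, -, h4, h5, h6⟩
      have hr3 : r + 1 + 1 + 1 < board.length := by push_cast at h4; omega
      have hc3 : c + 1 + 1 + 1 < W := by push_cast at h2; omega
      rw [pvCellVal board (r + 1 + 1 + 1) (c + 1 + 1 + 1) _ _ (by push_cast; ring) (by push_cast; ring) hc3] at h5
      exact ⟨⟨by omega, hc3, h5e2.symm.trans h5⟩, h6⟩
    · rintro ⟨⟨hq1, hq2, hq3⟩, h6⟩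
      rw [hgl] at hq1
      refine ⟨by push_cast; omega, by push_cast; omega, by push_cast; omega,
        by push_cast; omega, ?_, h6⟩
      rw [pvCellVal board (r + 1 + 1 + 1) (c + 1 + 1 + 1) _ _ (by push_cast; ring) (by push_cast; ring) hq2]
      exact h5e2.trans hq3

lemma pvDirA (board : List (List String)) (_hPre : Pre_calculate_connected_score board)
    (r c : Nat) (hr : r < board.length) (_hc : c < (board.headD []).length) :
    PySem.Dict.getD pvScoring
      (pvAInner board ((board.headD []).length : Int) (board.length : Int)
        (pvG (pvGrid board) r c) (c : Int) (r : Int) 1 (-1) [1, 2, 3] 0) 0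
      = if pvG (pvGrid board) r c ≠ "O" then
          pvF (pvT ((pvColtab (board.headD []).length 1 (pvGrid board).reverse).reverse) r c) else 0 := by
  have hgl : (pvGrid board).length = board.length := pvGridLen board
  rw [pvAInner_unfold]
  set W := (board.headD []).length with hW
  set g := pvGrid board with hg
  have hnn : ∀ row ∈ (pvColtab W 1 g.reverse).reverse, ∀ m ∈ row, 0 ≤ m := by
    intro row hrow
    exact pvColtab_nonneg W 1 g.reverse row (List.mem_reverse.mp hrow)
  apply pvCellDir _ _ _ _
    (1 ≤ r ∧ c + 1 < W ∧ pvG g r c = pvG g (r - 1) (c + 1))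
    (1 ≤ r - 1 ∧ c + 1 + 1 < W ∧ pvG g (r - 1) (c + 1) = pvG g (r - 1 - 1) (c + 1 + 1))
    (1 ≤ r - 1 - 1 ∧ c + 1 + 1 + 1 < W ∧
      pvG g (r - 1 - 1) (c + 1 + 1) = pvG g (r - 1 - 1 - 1) (c + 1 + 1 + 1))
    _ (pvT ((pvColtab W 1 g.reverse).reverse) (r - 1) (c + 1))
    (pvT ((pvColtab W 1 g.reverse).reverse) (r - 1 - 1) (c + 1 + 1))
    (pvT ((pvColtab W 1 g.reverse).reverse) (r - 1 - 1 - 1) (c + 1 + 1 + 1))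
  · exact pvAg_getD W g r c (by omega)
  · exact fun _ => pvAg_getD W g (r - 1) (c + 1) (by omega)
  · exact fun _ _ => pvAg_getD W g (r - 1 - 1) (c + 1 + 1) (by omega)
  · exact fun _ _ _ => pvT_nonneg _ _ _ hnn
  · constructor
    · rintro ⟨-, h2, h3, -, h5, h6⟩
      have hc1 : c + 1 < W := by push_cast at h2; omega
      have hr1 : 1 ≤ r := by push_cast at h3; omega
      rw [pvCellVal board (r - 1) (c + 1) _ _ (by omega) (by push_cast; ring) hc1] at h5
      exact ⟨⟨hr1, hc1, h5⟩, h6⟩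
    · rintro ⟨⟨hq1, hq2, hq3⟩, h6⟩
      refine ⟨by push_cast; omega, by push_cast; omega, by push_cast; omega,
        by push_cast; omega, ?_, h6⟩
      rw [pvCellVal board (r - 1) (c + 1) _ _ (by omega) (by push_cast; ring) hq2]
      exact hq3
  · rintro ⟨-, h2e, h3e, -, h5e, -⟩
    have hc1 : c + 1 < W := by push_cast at h2e; omega
    have hr1 : 1 ≤ r := by push_cast at h3e; omega
    rw [pvCellVal board (r - 1) (c + 1) _ _ (by omega) (by push_cast; ring) hc1] at h5e
    constructor
    · rintro ⟨-, h2, h3, -, h5, h6⟩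
      have hc2 : c + 1 + 1 < W := by push_cast at h2; omega
      have hr2 : 2 ≤ r := by push_cast at h3; omega
      rw [pvCellVal board (r - 1 - 1) (c + 1 + 1) _ _ (by omega) (by push_cast; ring) hc2] at h5
      exact ⟨⟨by omega, hc2, h5e.symm.trans h5⟩, h6⟩
    · rintro ⟨⟨hq1, hq2, hq3⟩, h6⟩
      have hr2 : 2 ≤ r := by omega
      refine ⟨by push_cast; omega, by push_cast; omega, by push_cast; omega,
        by push_cast; omega, ?_, h6⟩
      rw [pvCellVal board (r - 1 - 1) (c + 1 + 1) _ _ (by omega) (by push_cast; ring) hq2]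
      exact h5e.trans hq3
  · rintro ⟨-, h2e, h3e, -, h5e, -⟩ ⟨-, h2e2, h3e2, -, h5e2, -⟩
    have hc1 : c + 1 < W := by push_cast at h2e; omega
    have hr1 : 1 ≤ r := by push_cast at h3e; omega
    have hc2 : c + 1 + 1 < W := by push_cast at h2e2; omega
    have hr2 : 2 ≤ r := by push_cast at h3e2; omega
    rw [pvCellVal board (r - 1) (c + 1) _ _ (by omega) (by push_cast; ring) hc1] at h5e
    rw [pvCellVal board (r - 1 - 1) (c + 1 + 1) _ _ (by omega) (by push_cast; ring) hc2] at h5e2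
    constructor
    · rintro ⟨-, h2, h3, -, h5, h6⟩
      have hc3 : c + 1 + 1 + 1 < W := by push_cast at h2; omega
      have hr3 : 3 ≤ r := by push_cast at h3; omega
      rw [pvCellVal board (r - 1 - 1 - 1) (c + 1 + 1 + 1) _ _ (by omega) (by push_cast; ring) hc3] at h5
      exact ⟨⟨by omega, hc3, h5e2.symm.trans h5⟩, h6⟩
    · rintro ⟨⟨hq1, hq2, hq3⟩, h6⟩
      have hr3 : 3 ≤ r := by omega
      refine ⟨by push_cast; omega, by push_cast; omega, by push_cast; omega,
        by push_cast; omega, ?_, h6⟩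
      rw [pvCellVal board (r - 1 - 1 - 1) (c + 1 + 1 + 1) _ _ (by omega) (by push_cast; ring) hq2]
      exact h5e2.trans hq3

-- ===== VERDICT (by name: the statement is the Claim_ definition above) =====
theorem calculate_connected_score_spec : Claim_equal_calculate_connected_score := by
  unfold Claim_equal_calculate_connected_score
  intro board _ hPre
  unfold Spec_calculate_connected_score
  unfold calculate_connected_score calculate_connected_score_alt
  simp only [PySem.List.pyGetD_zero, ← pvHeadD, PySem.List.pyRange_one, sub_zero,
    Int.toNat_natCast, zero_add, List.foldl_map, List.length_map]
  rw [show (board.map (fun row => List.take (board.headD []).length row)) = pvGrid board from rfl]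
  apply PySem.List.foldl_congr_mem
  intro score r hrm
  have hr : r < board.length := List.mem_range.mp hrm
  apply PySem.List.foldl_congr_mem
  intro score c hcm
  have hc : c < (board.headD []).length := List.mem_range.mp hcm
  simp only [List.foldl_cons, List.foldl_nil]
  rw [pvCellVal board r c _ _ rfl rfl hc]
  rw [pvDirH board hPre r c hr hc, pvDirV board hPre r c hr hc,
    pvDirD board hPre r c hr hc, pvDirA board hPre r c hr hc]
  simp only [pvF, pvT, pvG]
  by_cases hO : ((pvGrid board).getD r []).getD c "" ≠ "O"
  · simp only [if_pos hO]
    rfl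
  · simp only [if_neg hO]
    omega
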